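-- pv_equiv track=rewrite | github.com/tusharrao198/CP_practice | CFPractice/A_Sequence_with_Digits.py | solve
-- ===== SOURCE A (Python) =====
-- def solve(x):
--     mx=float("-inf")
--     mn=float("inf")
--     for i in str(x):
--         num=int(i)
--         mx=max(mx,num)
--         mn=min(mn,num)
--
--     return mx*mn
-- ===== SOURCE B (Python) =====
-- def solve(x):
--     d = sorted(str(x))
--     return int(d[0]) * int(d[-1])
-- ===== Notes on version B (the rewrite author's own statement) =====
-- stated objective: simpler
-- what changed: Replaces the running max/min scan with +/-infinity sentinels by sorting the digit string once and multiplying the digit values at its two endpoints.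
import Mathlib
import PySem

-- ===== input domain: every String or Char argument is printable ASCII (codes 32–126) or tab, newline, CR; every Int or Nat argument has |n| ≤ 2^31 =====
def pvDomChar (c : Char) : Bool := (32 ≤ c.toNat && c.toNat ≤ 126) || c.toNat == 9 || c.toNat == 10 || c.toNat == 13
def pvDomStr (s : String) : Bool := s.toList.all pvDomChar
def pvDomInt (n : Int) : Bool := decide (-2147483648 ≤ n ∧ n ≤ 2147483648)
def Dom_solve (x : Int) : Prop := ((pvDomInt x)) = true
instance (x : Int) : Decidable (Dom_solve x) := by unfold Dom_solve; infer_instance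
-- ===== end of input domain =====

-- B sorts the digit string once and multiplies the two endpoint digits, instead of
-- A's running max/min scan with +/-infinity sentinels (objective: simpler).

-- int(i) for a single char i: exact when i is a digit '0'..'9'; Pre_solve gives x ≥ 0,
-- so every char of str(x) is a digit (both Pythons raise ValueError on '-' when x < 0).
def pvDigit (c : Char) : Int := (c.toNat : Int) - 48

-- ===== PORT A =====
-- the loop body: num = int(i); mx = max(mx, num); mn = min(mn, num).
-- float('-inf') / float('inf') are ported as the state `none` (no digit seen yet):
-- exact, since max(-inf, n) = n and min(inf, n) = n for every int n.
def pvStep (st : Option Int × Option Int) (i : Char) : Option Int × Option Int :=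
  let num := pvDigit i
  (some (match st.1 with | none => num | some m => max m num),
   some (match st.2 with | none => num | some m => min m num))

def solve (x : Int) : Int :=
  let st := (PySem.Int.toChars x).foldl pvStep (none, none)
  -- str(x) is never empty, so the `.getD 0` defaults are never consulted
  (st.1.getD 0) * (st.2.getD 0)

-- ===== PORT B =====
def solve_alt (x : Int) : Int :=
  let d := PySem.List.sorted (PySem.Int.toChars x) (fun c => c) false
  -- d[0] / d[-1]: str(x) is nonempty, so the '0' defaults are never consulted
  pvDigit (PySem.List.pyGetD d 0 '0') * pvDigit (PySem.List.pyGetD d (-1) '0')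

-- ===== PRECONDITION & SPEC =====
-- Pre_ excludes exactly x < 0, on which A raises ValueError (int('-')); B raises there too.
def Pre_solve (x : Int) : Prop := 0 ≤ x
instance (x : Int) : Decidable (Pre_solve x) := by unfold Pre_solve; infer_instance
def pvWitness_solve : Int := 10

def Spec_solve (x : Int) (out : Int) : Prop := out = solve_alt x
instance (x : Int) (out : Int) : Decidable (Spec_solve x out) := by unfold Spec_solve; infer_instance

-- ===== CLAIM (what is proved, stated in full; the proofs are below) =====
def Claim_equal_solve : Prop := ∀ (x : Int), Dom_solve x → Pre_solve x → Spec_solve x (solve x)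

-- ===== LEMMAS AND PROOFS =====

def pvFMax (t : List Char) (a : Int) : Int := t.foldl (fun m c => max m (pvDigit c)) a
def pvFMin (t : List Char) (a : Int) : Int := t.foldl (fun m c => min m (pvDigit c)) a

-- A's loop, started after the first digit, computes the running max and min of the digit values
theorem pvFold_run (l : List Char) (a b : Int) :
    l.foldl pvStep (some a, some b) = (some (pvFMax l a), some (pvFMin l b)) := by
  induction l generalizing a b with
  | nil => simp [pvFMax, pvFMin]
  | cons c t ih => simp [pvStep, pvFMax, pvFMin, List.foldl_cons, ih]

theorem pvDigit_mono {a b : Char} (h : a ≤ b) : pvDigit a ≤ pvDigit b := by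
  unfold pvDigit
  have : a.toNat ≤ b.toNat := by rw [Char.le_def] at h; exact h
  omega

theorem pvFMax_self_le (t : List Char) (a : Int) : a ≤ pvFMax t a := by
  induction t generalizing a with
  | nil => simp [pvFMax]
  | cons c t ih => exact le_trans (le_max_left _ _) (ih _)

theorem pvFMax_le_of_mem (t : List Char) (a : Int) {c : Char} (h : c ∈ t) :
    pvDigit c ≤ pvFMax t a := by
  induction t generalizing a with
  | nil => cases h
  | cons d t ih =>
    rcases List.mem_cons.mp h with rfl | h
    · exact le_trans (le_max_right _ _) (pvFMax_self_le _ _)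
    · exact ih _ h

theorem pvFMax_cases (t : List Char) (a : Int) :
    pvFMax t a = a ∨ ∃ c ∈ t, pvFMax t a = pvDigit c := by
  induction t generalizing a with
  | nil => left; rfl
  | cons d t ih =>
    rcases ih (max a (pvDigit d)) with h | ⟨c, hc, h⟩
    · rcases max_choice a (pvDigit d) with hm | hm
      · left; rw [pvFMax, List.foldl_cons] at *; rw [h, hm]
      · right; exact ⟨d, List.mem_cons_self, by rw [pvFMax, List.foldl_cons] at *; rw [h, hm]⟩
    · right; exact ⟨c, List.mem_cons_of_mem _ hc, h⟩

theorem pvFMin_le_self (t : List Char) (a : Int) : pvFMin t a ≤ a := by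
  induction t generalizing a with
  | nil => simp [pvFMin]
  | cons c t ih => exact le_trans (ih _) (min_le_left _ _)

theorem pvFMin_le_of_mem (t : List Char) (a : Int) {c : Char} (h : c ∈ t) :
    pvFMin t a ≤ pvDigit c := by
  induction t generalizing a with
  | nil => cases h
  | cons d t ih =>
    rcases List.mem_cons.mp h with rfl | h
    · rw [pvFMin, List.foldl_cons]; exact le_trans (pvFMin_le_self _ _) (min_le_right _ _)
    · exact ih _ h

theorem pvFMin_cases (t : List Char) (a : Int) :
    pvFMin t a = a ∨ ∃ c ∈ t, pvFMin t a = pvDigit c := by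
  induction t generalizing a with
  | nil => left; rfl
  | cons d t ih =>
    rcases ih (min a (pvDigit d)) with h | ⟨c, hc, h⟩
    · rcases min_choice a (pvDigit d) with hm | hm
      · left; rw [pvFMin, List.foldl_cons] at *; rw [h, hm]
      · right; exact ⟨d, List.mem_cons_self, by rw [pvFMin, List.foldl_cons] at *; rw [h, hm]⟩
    · right; exact ⟨c, List.mem_cons_of_mem _ hc, h⟩

-- in a (·≤·)-pairwise list every element is at most the last
theorem pvPairwise_le_getLast {l : List Char} (hp : l.Pairwise (· ≤ ·)) (h : l ≠ [])
    {y : Char} (hy : y ∈ l) : y ≤ l.getLast h := by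
  induction l with
  | nil => cases hy
  | cons a t ih =>
    rcases List.pairwise_cons.mp hp with ⟨ha, hp'⟩
    by_cases ht : t = []
    · subst ht; simp at hy; subst hy; simp [List.getLast]
    · rw [List.getLast_cons ht]
      rcases List.mem_cons.mp hy with rfl | hy
      · exact ha _ (List.getLast_mem ht)
      · exact ih hp' ht hy

-- the main equivalence, over the char list of str(x) (holds for every char list)
theorem pvMain (x : Int) : solve x = solve_alt x := by
  unfold solve solve_alt
  set l := PySem.Int.toChars x with hl
  clear_value l
  cases l with
  | nil => decide
  | cons c t =>
    set s := PySem.List.sorted (c :: t) (fun c => c) false with hs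
    have hperm : s.Perm (c :: t) := PySem.List.sorted_perm _ _ _
    have hsne : s ≠ [] := by
      intro h; exact absurd (hperm.symm.length_eq ▸ congrArg List.length h) (by simp)
    obtain ⟨h0, tt, hcons⟩ := List.exists_cons_of_ne_nil hsne
    have hpw : s.Pairwise (fun a b => a ≤ b) := PySem.List.sorted_pairwise _ _
    have hhead : ∀ y ∈ (c :: t), h0 ≤ y :=
      fun y hy => PySem.List.key_head_sorted_le _ _ (hs.symm.trans hcons) y hy
    have hlast : ∀ y ∈ (c :: t), y ≤ s.getLast hsne := by
      intro y hy
      exact pvPairwise_le_getLast hpw hsne (hperm.symm.mem_iff.mp hy)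
    have hget0 : PySem.List.pyGetD s 0 '0' = h0 := by
      rw [hcons]; simp [PySem.List.pyGetD, PySem.List.pyGet?, PySem.List.pyIdx?]
    have hgetlast : PySem.List.pyGetD s (-1) '0' = s.getLast hsne := by
      simp [PySem.List.pyGetD, PySem.List.pyGet?_neg_one, List.getLast?_eq_some_getLast hsne]
    have hmax : pvFMax t (pvDigit c) = pvDigit (s.getLast hsne) := by
      apply le_antisymm
      · rcases pvFMax_cases t (pvDigit c) with h | ⟨d, hd, h⟩
        · rw [h]; exact pvDigit_mono (hlast c (List.mem_cons_self))
        · rw [h]; exact pvDigit_mono (hlast d (List.mem_cons_of_mem _ hd))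
      · have hmem : s.getLast hsne ∈ (c :: t) := hperm.mem_iff.mp (List.getLast_mem hsne)
        rcases List.mem_cons.mp hmem with h | h
        · rw [← h]; exact pvFMax_self_le _ _
        · exact pvFMax_le_of_mem _ _ h
    have hmin : pvFMin t (pvDigit c) = pvDigit h0 := by
      apply le_antisymm
      · have hmem : h0 ∈ (c :: t) := hperm.mem_iff.mp (hcons ▸ List.mem_cons_self)
        rcases List.mem_cons.mp hmem with h | h
        · rw [← h]; exact pvFMin_le_self _ _
        · exact pvFMin_le_of_mem _ _ h
      · rcases pvFMin_cases t (pvDigit c) with h | ⟨d, hd, h⟩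
        · rw [h]; exact pvDigit_mono (hhead c (List.mem_cons_self))
        · rw [h]; exact pvDigit_mono (hhead d (List.mem_cons_of_mem _ hd))
    rw [List.foldl_cons]
    have hstep0 : pvStep (none, none) c = (some (pvDigit c), some (pvDigit c)) := rfl
    rw [hstep0, pvFold_run]
    simp only [hget0, hgetlast, hmax, hmin, Option.getD_some]
    ring

-- ===== VERDICT (by name: the statement is the Claim_ definition above) =====
theorem solve_spec : Claim_equal_solve := by
  intro x _ _
  unfold Spec_solve
  exact pvMain x
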